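-- pv_equiv track=rewrite | github.com/abdullahau/Data-Structures-and-Algorithms-Spring-2024 | Exercises/Week 5/packbox.py | solve
-- ===== SOURCE A (Python) =====
-- def solve(t, x):
--     t = sorted(t)
--     total = 0
--     packed = 0
--
--     for p in t:
--         total += p
--         if total <= x:
--             packed += 1
--         else:
--             break
--
--     return packed
-- ===== SOURCE B (Python) =====
-- def solve(t, x):
--     # Selection-based: repeatedly extract the minimum of the remaining
--     # (unsorted) items; no sort call at all.
--     items = list(t)
--     total = 0
--     packed = 0
--     while items:
--         m = min(items)
--         if total + m > x:
--             break
--         total += m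
--         packed += 1
--         items.remove(m)
--     return packed
-- ===== Notes on version B (the rewrite author's own statement) =====
-- stated objective: alternative
-- what changed: Replaces A's sort-then-scan-with-break by repeated minimum extraction from the unsorted list (selection-style: min() + remove() per accepted item, no sorted() call); trades asymptotic speed (quadratic when most items fit) for a sort-free algorithm.
import Mathlib
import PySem

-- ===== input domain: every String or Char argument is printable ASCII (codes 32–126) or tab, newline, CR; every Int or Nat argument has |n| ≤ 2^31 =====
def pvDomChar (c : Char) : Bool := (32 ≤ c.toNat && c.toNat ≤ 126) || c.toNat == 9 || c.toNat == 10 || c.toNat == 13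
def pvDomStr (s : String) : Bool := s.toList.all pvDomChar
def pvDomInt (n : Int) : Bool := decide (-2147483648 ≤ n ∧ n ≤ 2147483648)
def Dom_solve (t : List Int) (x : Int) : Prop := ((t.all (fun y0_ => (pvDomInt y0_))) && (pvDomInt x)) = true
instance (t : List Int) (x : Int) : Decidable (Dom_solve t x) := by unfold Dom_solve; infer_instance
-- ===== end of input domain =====

-- B replaces A's sort-then-scan by repeated minimum extraction from the unsorted list (alternative algorithm, same result).


-- ===== PORT A =====
-- the for-loop over sorted t with running total, counter and break
def solveLoop (x : Int) : List Int → Int → Int → Int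
  | [], _, packed => packed
  | p :: rest, total, packed =>
    if total + p ≤ x then solveLoop x rest (total + p) (packed + 1) else packed

def solve (t : List Int) (x : Int) : Int :=
  solveLoop x (PySem.List.sorted t (fun y => y) false) 0 0

-- ===== PORT B =====
-- while items: m = min(items); if total + m > x: break; total += m; packed += 1; items.remove(m)
def solveAltLoop (x : Int) (items : List Int) (total packed : Int) : Int :=
  match _hm : PySem.List.min? items (fun y => y) with
  | none => packed
  | some m =>
    if total + m > x then packed
    else
      match hr : PySem.List.remove? items m with
      | none => packed   -- dead branch: min(items) is always in items, so .remove never raises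
      | some rest => solveAltLoop x rest (total + m) (packed + 1)
termination_by items.length
decreasing_by
  have hmem : m ∈ items := PySem.List.min?_mem _hm
  have := PySem.List.remove?_eq_some_erase items m hmem
  rw [this] at hr
  cases hr
  have h1 := List.length_erase_of_mem hmem
  have h2 := List.length_pos_of_mem hmem
  omega

def solve_alt (t : List Int) (x : Int) : Int :=
  solveAltLoop x t 0 0

-- ===== PRECONDITION & SPEC =====
def Spec_solve (t : List Int) (x : Int) (out : Int) : Prop := out = solve_alt t x
instance (t : List Int) (x : Int) (out : Int) : Decidable (Spec_solve t x out) := by unfold Spec_solve; infer_instance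

-- ===== CLAIM (what is proved, stated in full; the proofs are below) =====
def Claim_equal_solve : Prop := ∀ (t : List Int) (x : Int), Dom_solve t x → Spec_solve t x (solve t x)

-- ===== LEMMAS AND PROOFS =====
-- sorted l = min :: sorted (l.erase min)
theorem sorted_cons_min (l : List Int) (m : Int)
    (hm : PySem.List.min? l (fun y => y) = some m) :
    PySem.List.sorted l (fun y => y) false
      = m :: PySem.List.sorted (l.erase m) (fun y => y) false := by
  have hmem : m ∈ l := PySem.List.min?_mem hm
  have hmin : ∀ y ∈ l, m ≤ y := PySem.List.min?_isMin hm
  refine (PySem.List.sorted_id_eq_of_perm_of_pairwise _ _ ?_ ?_)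
  · exact ((PySem.List.sorted_perm _ _ _).cons m).trans
      (List.perm_cons_erase hmem).symm
  · refine List.pairwise_cons.mpr ⟨?_, PySem.List.sorted_pairwise ..⟩
    intro y hy
    exact hmin y (List.mem_of_mem_erase ((PySem.List.mem_sorted ..).mp hy))

theorem solveAltLoop_nil (x total packed : Int) :
    solveAltLoop x [] total packed = packed := by
  rw [solveAltLoop]
  split
  · rfl
  · next m heq => simp [PySem.List.min?] at heq

theorem solveAltLoop_cons (x : Int) (l : List Int) (total packed m : Int)
    (hl : PySem.List.min? l (fun y => y) = some m)
    (hr : PySem.List.remove? l m = some (l.erase m)) :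
    solveAltLoop x l total packed
      = if total + m > x then packed
        else solveAltLoop x (l.erase m) (total + m) (packed + 1) := by
  rw [solveAltLoop]
  split
  · next heq => rw [hl] at heq; cases heq
  · next m' heq =>
      rw [hl] at heq
      injection heq with h
      subst h
      split_ifs with hgt
      · rfl
      · split
        · next heq2 => rw [hr] at heq2; cases heq2
        · next rest heq2 =>
            rw [hr] at heq2
            injection heq2 with h2
            rw [h2]

theorem loop_eq (x : Int) :
    ∀ n (l : List Int) (total packed : Int), l.length ≤ n →
      solveLoop x (PySem.List.sorted l (fun y => y) false) total packed
        = solveAltLoop x l total packed := by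
  intro n
  induction n with
  | zero =>
      intro l total packed hn
      have hl : l = [] := List.length_eq_zero_iff.mp (Nat.le_zero.mp hn)
      subst hl
      simp [solveLoop, solveAltLoop_nil, PySem.List.sorted]
  | succ k ih =>
      intro l total packed hn
      cases hl : PySem.List.min? l (fun y => y) with
      | none =>
          have : l = [] := (PySem.List.min?_eq_none_iff ..).mp hl
          subst this
          simp [solveLoop, solveAltLoop_nil, PySem.List.sorted]
      | some m =>
          have hmem : m ∈ l := PySem.List.min?_mem hl
          have hrm := PySem.List.remove?_eq_some_erase l m hmem
          rw [sorted_cons_min l m hl, solveAltLoop_cons x l total packed m hl hrm]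
          by_cases hle : total + m ≤ x
          · have hgt : ¬ (total + m > x) := by omega
            simp only [solveLoop, if_pos hle, if_neg hgt]
            exact ih (l.erase m) (total + m) (packed + 1)
              (by have h1 := List.length_erase_of_mem hmem
                  have h2 := List.length_pos_of_mem hmem
                  omega)
          · have hgt : total + m > x := by omega
            simp [solveLoop, if_neg hle, if_pos hgt]

-- ===== VERDICT (by name: the statement is the Claim_ definition above) =====
theorem solve_spec : Claim_equal_solve := by
  intro t x _
  show solveLoop x (PySem.List.sorted t (fun y => y) false) 0 0 = solveAltLoop x t 0 0
  exact loop_eq x t.length t 0 0 le_rfl
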